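-- pv_equiv track=rewrite | github.com/Zzsf11/VideoCuttingAgent | vca/build_database/get_character.py | get_speaker_dialogues
-- ===== SOURCE A (Python) =====
-- from typing import Dict, List, Tuple, Optional
--
-- def get_speaker_dialogues(subtitles: List[Dict]) -> Dict[str, List[str]]:
--     """
--     Group dialogues by speaker.
--
--     Args:
--         subtitles: List of parsed subtitle entries
--
--     Returns:
--         Dictionary mapping speaker labels to their dialogues
--     """
--     speaker_dialogues = {}
--     for sub in subtitles:
--         speaker = sub['speaker']
--         if speaker not in speaker_dialogues:
--             speaker_dialogues[speaker] = []
--         if sub['dialogue']:  # Only add non-empty dialogues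
--             speaker_dialogues[speaker].append(sub['dialogue'])
--     return speaker_dialogues
-- ===== SOURCE B (Python) =====
-- def get_speaker_dialogues(subtitles):
--     """Group dialogues by speaker: first collect the distinct speakers in
--     order of first appearance, then for each speaker scan the subtitles and
--     collect its non-empty dialogues."""
--     speakers = []
--     for sub in subtitles:
--         if sub['speaker'] not in speakers:
--             speakers.append(sub['speaker'])
--     return {spk: [sub['dialogue'] for sub in subtitles
--                   if sub['speaker'] == spk and sub['dialogue']]
--             for spk in speakers}
-- ===== Notes on version B (the rewrite author's own statement) =====
-- stated objective: alternative
-- what changed: B first builds the ordered list of distinct speakers, then for each speaker does a separate scan of the subtitles collecting its non-empty dialogues (O(n*k) nested scans), instead of A's single-pass dict accumulation; Pre_ excludes only entries missing the 'speaker' or 'dialogue' key, on which A raises KeyError.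
import Mathlib
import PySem

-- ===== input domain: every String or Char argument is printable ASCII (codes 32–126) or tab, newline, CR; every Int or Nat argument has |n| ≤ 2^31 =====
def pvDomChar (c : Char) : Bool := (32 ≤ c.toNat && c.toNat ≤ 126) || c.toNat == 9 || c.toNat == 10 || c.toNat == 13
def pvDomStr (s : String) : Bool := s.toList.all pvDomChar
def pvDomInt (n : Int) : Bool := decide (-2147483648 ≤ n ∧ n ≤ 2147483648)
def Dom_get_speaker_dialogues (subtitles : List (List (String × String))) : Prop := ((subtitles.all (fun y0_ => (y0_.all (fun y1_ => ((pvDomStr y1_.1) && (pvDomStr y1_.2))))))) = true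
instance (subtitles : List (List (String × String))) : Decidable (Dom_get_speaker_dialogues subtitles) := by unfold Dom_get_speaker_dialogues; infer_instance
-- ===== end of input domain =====

-- B collects the distinct speakers in first-appearance order, then scans the subtitles once
-- per speaker to collect its non-empty dialogues, instead of A's single-pass dict accumulation.

-- ===== PORT A =====
def get_speaker_dialogues (subtitles : List (List (String × String))) : List (String × List String) :=
  (subtitles.foldl (fun d sub =>
      let speaker := (PySem.Dict.ofList sub).getD "speaker" ""
      let d := if d.contains speaker then d else d.insert speaker []
      let dialogue := (PySem.Dict.ofList sub).getD "dialogue" ""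
      if dialogue != "" then d.modify speaker [] (· ++ [dialogue]) else d)
    PySem.Dict.empty).items

-- ===== PORT B =====
def get_speaker_dialogues_alt (subtitles : List (List (String × String))) : List (String × List String) :=
  (subtitles.foldl (fun speakers sub =>
      if speakers.contains ((PySem.Dict.ofList sub).getD "speaker" "") then speakers
      else speakers ++ [(PySem.Dict.ofList sub).getD "speaker" ""]) []).map
    (fun spk =>
      (spk, (subtitles.filter (fun sub =>
          ((PySem.Dict.ofList sub).getD "speaker" "" == spk) &&
          ((PySem.Dict.ofList sub).getD "dialogue" "" != ""))).map
        (fun sub => (PySem.Dict.ofList sub).getD "dialogue" "")))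

-- ===== PRECONDITION & SPEC =====
-- Pre_ excludes only the inputs where the Python A raises KeyError: a subtitle entry missing
-- the 'speaker' or the 'dialogue' key.
def Pre_get_speaker_dialogues (subtitles : List (List (String × String))) : Prop :=
  (subtitles.all (fun sub => sub.any (fun p => p.1 == "speaker") && sub.any (fun p => p.1 == "dialogue"))) = true
instance (subtitles : List (List (String × String))) : Decidable (Pre_get_speaker_dialogues subtitles) := by unfold Pre_get_speaker_dialogues; infer_instance
def pvWitness_get_speaker_dialogues : (List (List (String × String))) :=
  [[("speaker", "alice"), ("dialogue", "hi")], [("speaker", "bob"), ("dialogue", "")]]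
def Spec_get_speaker_dialogues (subtitles : List (List (String × String))) (out : List (String × List String)) : Prop := out = get_speaker_dialogues_alt subtitles
instance (subtitles : List (List (String × String))) (out : List (String × List String)) : Decidable (Spec_get_speaker_dialogues subtitles out) := by unfold Spec_get_speaker_dialogues; infer_instance

-- ===== CLAIM (what is proved, stated in full; the proofs are below) =====
def Claim_equal_get_speaker_dialogues : Prop := ∀ (subtitles : List (List (String × String))), Dom_get_speaker_dialogues subtitles → Pre_get_speaker_dialogues subtitles → Spec_get_speaker_dialogues subtitles (get_speaker_dialogues subtitles)

-- ===== LEMMAS AND PROOFS =====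

-- abbreviations for the proofs (the ports themselves stay literal)
def pvSpk (sub : List (String × String)) : String := (PySem.Dict.ofList sub).getD "speaker" ""
def pvDlg (sub : List (String × String)) : String := (PySem.Dict.ofList sub).getD "dialogue" ""
def pvStepA (d : PySem.Dict String (List String)) (sub : List (String × String)) :
    PySem.Dict String (List String) :=
  let d := if d.contains (pvSpk sub) then d else d.insert (pvSpk sub) []
  if pvDlg sub != "" then d.modify (pvSpk sub) [] (· ++ [pvDlg sub]) else d
def pvStepS (speakers : List String) (sub : List (String × String)) : List String :=
  if speakers.contains (pvSpk sub) then speakers else speakers ++ [pvSpk sub]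
def pvDial (spk : String) (xs : List (List (String × String))) : List String :=
  (xs.filter (fun sub => (pvSpk sub == spk) && (pvDlg sub != ""))).map pvDlg

theorem pvStepS_subset (xs : List (List (String × String))) (a : String) :
    ∀ acc : List String, a ∈ acc → a ∈ xs.foldl pvStepS acc := by
  induction xs with
  | nil => exact fun _ h => h
  | cons s t ih =>
      intro acc h
      apply ih
      unfold pvStepS
      split
      · exact h
      · exact List.mem_append_left _ h

theorem pvStepS_mem (xs : List (List (String × String)))
    (sub : List (String × String)) (h : sub ∈ xs) :
    ∀ acc : List String, pvSpk sub ∈ xs.foldl pvStepS acc := by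
  induction xs with
  | nil => cases h
  | cons s t ih =>
      intro acc
      simp only [List.foldl_cons]
      rcases List.mem_cons.mp h with h' | h'
      · subst h'
        apply pvStepS_subset
        unfold pvStepS
        split
        · rename_i hc; simpa using hc
        · exact List.mem_append_right _ (by simp)
      · exact ih h' _

theorem pvStepS_nodup (xs : List (List (String × String))) :
    ∀ acc : List String, acc.Nodup → (xs.foldl pvStepS acc).Nodup := by
  induction xs with
  | nil => exact fun _ h => h
  | cons s t ih =>
      intro acc h
      apply ih
      unfold pvStepS
      split
      · exact h
      · rename_i hc
        simp only [List.contains_eq_mem, Bool.not_eq_true, decide_eq_false_iff_not] at hc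
        rw [List.nodup_append]
        refine ⟨h, by simp, ?_⟩
        intro a ha b hbmem
        have hb' : b = pvSpk s := by simpa using hbmem
        exact fun he => hc ((he.trans hb') ▸ ha)

theorem pvDial_nil (spk : String) (xs : List (List (String × String)))
    (h : spk ∉ xs.foldl pvStepS []) : pvDial spk xs = [] := by
  unfold pvDial
  rw [List.filter_eq_nil_iff.mpr, List.map_nil]
  intro sub hs
  by_contra hb
  simp only [Bool.and_eq_true, beq_iff_eq] at hb
  exact h (hb.1 ▸ pvStepS_mem xs sub hs [])

theorem pv_contains_eq (d : PySem.Dict String (List String)) (S : List String)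
    (f : String → List String) (hd : d.items = S.map (fun k => (k, f k))) (k : String) :
    d.contains k = S.contains k := by
  have : d.contains k = d.items.any (fun p => p.1 == k) := rfl
  rw [this, hd, List.any_map]
  have hcomp : ((fun p : String × List String => p.1 == k) ∘ fun k => (k, f k)) = (fun x => x == k) := rfl
  rw [hcomp, List.contains_eq_mem]
  clear this hd
  induction S with
  | nil => simp
  | cons a t iht =>
      simp only [List.any_cons, iht, List.mem_cons]
      by_cases ha : a = k
      · simp [ha]
      · have ha2 : ¬ k = a := fun h => ha h.symm
        simp [ha, ha2]

theorem pv_keys_eq (d : PySem.Dict String (List String)) (S : List String)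
    (f : String → List String) (hd : d.items = S.map (fun k => (k, f k))) :
    d.keys = S := by
  have : d.keys = d.items.map (·.1) := rfl
  rw [this, hd, List.map_map]
  simp [Function.comp_def]

theorem pv_main (xs : List (List (String × String))) :
    (xs.foldl pvStepA PySem.Dict.empty).items
      = (xs.foldl pvStepS []).map (fun k => (k, pvDial k xs)) := by
  induction xs using List.reverseRecOn with
  | nil => rfl
  | append_singleton xs sub ih =>
      rw [List.foldl_append, List.foldl_append]
      simp only [List.foldl_cons, List.foldl_nil]
      set d := xs.foldl pvStepA PySem.Dict.empty with hd
      set S := xs.foldl pvStepS [] with hS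
      have hnd : S.Nodup := pvStepS_nodup xs [] List.nodup_nil
      have hkeys : d.keys = S := pv_keys_eq d S _ ih
      have hknd : d.keys.Nodup := hkeys ▸ hnd
      have hcont : d.contains (pvSpk sub) = S.contains (pvSpk sub) := pv_contains_eq d S _ ih _
      have hdial : ∀ k, pvDial k (xs ++ [sub])
          = pvDial k xs ++ (if (pvSpk sub == k) && (pvDlg sub != "") then [pvDlg sub] else []) := by
        intro k
        unfold pvDial
        rw [List.filter_append, List.map_append]
        congr 1
        simp only [List.filter_cons, List.filter_nil]
        split <;> simp
      have hgetD : ∀ k, k ∈ S → d.getD k [] = pvDial k xs := by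
        intro k hk
        apply PySem.Dict.getD_of_mem_items d _ hknd
        rw [ih]
        exact List.mem_map_of_mem hk
      unfold pvStepA pvStepS
      by_cases hc : S.contains (pvSpk sub) = true
      · -- speaker already seen
        simp only [hcont, hc, if_pos]
        by_cases hv : pvDlg sub = ""
        · -- empty dialogue: nothing changes
          simp only [hv, bne_self_eq_false, Bool.false_eq_true, if_false, ih]
          apply List.map_congr_left
          intro k hk
          rw [hdial k, hv]
          simp
        · have hvb : (pvDlg sub != "") = true := by simpa using hv
          simp only [hvb, if_pos]
          have hcd : d.contains (pvSpk sub) = true := by rw [hcont]; exact hc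
          simp only [PySem.Dict.modify]
          rw [PySem.Dict.items_insert_of_contains _ _ hcd, ih, List.map_map]
          apply List.map_congr_left
          intro k hk
          rw [hdial k]
          by_cases hkk : k = pvSpk sub
          · subst hkk
            simp [Function.comp, hgetD _ hk, hvb]
          · have h1 : (k == pvSpk sub) = false := by simpa using hkk
            have h2 : (pvSpk sub == k) = false := by simpa using (Ne.symm hkk)
            simp [Function.comp, h1, h2]
      · -- fresh speaker
        have hc' : d.contains (pvSpk sub) = false := by rw [hcont]; simpa using hc
        have hnS : pvSpk sub ∉ S := by
          simpa [List.contains_eq_mem] using hc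
        have hd0 : pvDial (pvSpk sub) xs = [] := pvDial_nil _ xs (hS ▸ hnS)
        simp only [hcont, hc, Bool.false_eq_true, if_false]
        by_cases hv : pvDlg sub = ""
        · simp only [hv, bne_self_eq_false, Bool.false_eq_true, if_false]
          rw [PySem.Dict.items_insert_of_not_contains _ _ hc', ih, List.map_append]
          congr 1
          · apply List.map_congr_left
            intro k hk
            rw [hdial k]
            have h2 : (pvSpk sub == k) = false := by
              simp only [beq_eq_false_iff_ne, ne_eq]
              intro he; exact hnS (he ▸ hk)
            simp [h2]
          · simp [hdial, hd0, hv]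
        · have hvb : (pvDlg sub != "") = true := by simpa using hv
          simp only [hvb, if_pos]
          simp only [PySem.Dict.modify]
          have hci : (d.insert (pvSpk sub) []).contains (pvSpk sub) = true :=
            PySem.Dict.contains_insert_self _ _ _
          rw [PySem.Dict.items_insert_of_contains _ _ hci,
              PySem.Dict.getD_insert_self,
              PySem.Dict.items_insert_of_not_contains _ _ hc', ih,
              List.map_append, List.map_append, List.map_map]
          congr 1
          · apply List.map_congr_left
            intro k hk
            rw [hdial k]
            have h1 : (k == pvSpk sub) = false := by
              simp only [beq_eq_false_iff_ne, ne_eq]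
              intro he; exact hnS (he ▸ hk)
            have h2 : (pvSpk sub == k) = false := by
              simp only [beq_eq_false_iff_ne, ne_eq]
              intro he; exact hnS (he ▸ hk)
            simp [Function.comp, h1, h2]
          · simp [hdial, hd0, hvb]

-- ===== VERDICT (by name: the statement is the Claim_ definition above) =====
theorem get_speaker_dialogues_spec : Claim_equal_get_speaker_dialogues := by
  intro subtitles _ _
  unfold Spec_get_speaker_dialogues get_speaker_dialogues get_speaker_dialogues_alt
  have := pv_main subtitles
  unfold pvStepA pvStepS pvDial pvSpk pvDlg at this
  simpa using this
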